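-- pv_equiv track=rewrite | github.com/icyplayer/TSU_DataStructures_Part1_Python | ch1_intro/max2.py | max2bf
-- ===== SOURCE A (Python) =====
-- def max2bf(A, lo, hi):
--     """ Bruce force method according to 01E-8 1st example """
--     x1, x2 = lo, lo
--     for i in range(lo, hi):
--         if A[x1] < A[i]:
--             x1 = i
--     for i in range(lo, x1):
--         if A[x2] < A[i]:
--             x2 = i
--     for i in range(x1+1, hi):
--         if A[x2] < A[i]:
--             x2 = i
--     return A[x1], A[x2]
-- ===== SOURCE B (Python) =====
-- def max2bf(A, lo, hi):
--     m1 = m2 = A[lo]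
--     for i in range(lo + 1, hi):
--         v = A[i]
--         if v > m1:
--             m1, m2 = v, m1
--         elif v > m2:
--             m2 = v
--     return m1, m2
-- ===== Notes on version B (the rewrite author's own statement) =====
-- stated objective: simpler
-- what changed: A finds the argmax index in one loop and then rescans the range in two more loops to find the runner-up index; B is a single left-to-right pass tracking the top two values (seeded m1=m2=A[lo], which reproduces A's lo-anchored (max,max) behaviour naturally).
import Mathlib
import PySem

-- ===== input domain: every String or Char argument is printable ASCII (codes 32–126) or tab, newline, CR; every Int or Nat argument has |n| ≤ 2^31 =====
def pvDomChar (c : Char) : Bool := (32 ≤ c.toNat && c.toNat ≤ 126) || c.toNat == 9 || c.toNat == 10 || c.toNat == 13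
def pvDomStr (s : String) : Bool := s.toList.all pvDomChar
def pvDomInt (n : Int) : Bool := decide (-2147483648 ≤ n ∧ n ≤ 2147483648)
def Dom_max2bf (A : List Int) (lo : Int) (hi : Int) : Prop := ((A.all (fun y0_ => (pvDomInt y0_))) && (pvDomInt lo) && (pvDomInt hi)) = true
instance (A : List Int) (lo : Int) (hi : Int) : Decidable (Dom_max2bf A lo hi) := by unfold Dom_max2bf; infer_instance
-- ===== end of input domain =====

-- B replaces A's argmax pass plus two rescans by a single pass tracking the top two values (objective: simpler).

-- ===== PORT A =====
-- A's loop body 'if A[x] < A[i]: x = i', shared by all three of A's loops.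
-- Indexing uses PySem.List.pyGetD (exact Python indexing incl. negative indices under Pre_).
def pvStep (A : List Int) (x : Int) (i : Int) : Int :=
  if PySem.List.pyGetD A x 0 < PySem.List.pyGetD A i 0 then i else x

def max2bf (A : List Int) (lo : Int) (hi : Int) : Int × Int :=
  let x1 := (PySem.List.pyRange lo hi 1).foldl (pvStep A) lo
  let x2 := (PySem.List.pyRange lo x1 1).foldl (pvStep A) lo
  let x2 := (PySem.List.pyRange (x1 + 1) hi 1).foldl (pvStep A) x2
  (PySem.List.pyGetD A x1 0, PySem.List.pyGetD A x2 0)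

-- ===== PORT B =====
-- B's loop body: 'v = A[i]; if v > m1: m1, m2 = v, m1 elif v > m2: m2 = v'
def pvUpd (A : List Int) (m : Int × Int) (i : Int) : Int × Int :=
  let v := PySem.List.pyGetD A i 0
  if m.1 < v then (v, m.1) else if m.2 < v then (m.1, v) else m

def max2bf_alt (A : List Int) (lo : Int) (hi : Int) : Int × Int :=
  (PySem.List.pyRange (lo + 1) hi 1).foldl (pvUpd A)
    (PySem.List.pyGetD A lo 0, PySem.List.pyGetD A lo 0)

-- ===== PRECONDITION & SPEC =====
-- Exactly the inputs on which Python A returns without IndexError: A[lo] must exist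
-- (Python negative indexing allowed), and the loop range(lo, hi) must stay in bounds
-- (vacuously when hi ≤ lo).
def Pre_max2bf (A : List Int) (lo : Int) (hi : Int) : Prop :=
  -(A.length : Int) ≤ lo ∧ lo < (A.length : Int) ∧ (hi ≤ (A.length : Int) ∨ hi ≤ lo)
instance (A : List Int) (lo : Int) (hi : Int) : Decidable (Pre_max2bf A lo hi) := by unfold Pre_max2bf; infer_instance
def pvWitness_max2bf : List Int × Int × Int := ([3, 5, 4], 0, 3)

def Spec_max2bf (A : List Int) (lo : Int) (hi : Int) (out : Int × Int) : Prop := out = max2bf_alt A lo hi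
instance (A : List Int) (lo : Int) (hi : Int) (out : Int × Int) : Decidable (Spec_max2bf A lo hi out) := by unfold Spec_max2bf; infer_instance

-- ===== CLAIM (what is proved, stated in full; the proofs are below) =====
def Claim_equal_max2bf : Prop := ∀ (A : List Int) (lo : Int) (hi : Int), Dom_max2bf A lo hi → Pre_max2bf A lo hi → Spec_max2bf A lo hi (max2bf A lo hi)

-- ===== LEMMAS AND PROOFS =====

-- The fold of A's argmax step returns its seed or a member of the traversed list.
theorem pvStep_foldl_mem (A : List Int) (l : List Int) (s : Int) :
    l.foldl (pvStep A) s = s ∨ l.foldl (pvStep A) s ∈ l := by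
  induction l generalizing s with
  | nil => exact Or.inl rfl
  | cons a l ih =>
    simp only [List.foldl_cons]
    rcases ih (pvStep A s a) with h | h
    · rw [h]
      unfold pvStep
      split
      · exact Or.inr (List.mem_cons_self)
      · exact Or.inl rfl
    · exact Or.inr (List.mem_cons_of_mem _ h)

-- Unfolding equations used as rewrite rules.
theorem pvStep_getD (A : List Int) (x b : Int) :
    PySem.List.pyGetD A (pvStep A x b) 0
      = if PySem.List.pyGetD A x 0 < PySem.List.pyGetD A b 0
        then PySem.List.pyGetD A b 0 else PySem.List.pyGetD A x 0 := by
  unfold pvStep; split <;> rfl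

theorem pvUpd_eq (A : List Int) (m : Int × Int) (b : Int) :
    pvUpd A m b
      = if m.1 < PySem.List.pyGetD A b 0 then (PySem.List.pyGetD A b 0, m.1)
        else if m.2 < PySem.List.pyGetD A b 0 then (m.1, PySem.List.pyGetD A b 0) else m := rfl

-- Core: the two ports agree on every range of length n starting at lo.
theorem pv_main (A : List Int) (lo : Int) (n : Nat) :
    max2bf A lo (lo + n) = max2bf_alt A lo (lo + n) := by
  induction n with
  | zero =>
    simp [max2bf, max2bf_alt, PySem.List.pyRange_one_eq_nil]
  | succ m ih =>
    rcases Nat.eq_zero_or_pos m with hm | hm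
    · subst hm
      have h1 : lo + (((0:Nat)+1 : Nat) : Int) = lo + 1 := by push_cast; omega
      rw [h1]
      simp [max2bf, max2bf_alt, PySem.List.pyRange_one_singleton,
        PySem.List.pyRange_one_eq_nil (le_refl lo),
        PySem.List.pyRange_one_eq_nil (le_refl (lo + 1)), pvStep]
    · have hb : lo + ((m+1 : Nat) : Int) = (lo + (m:Int)) + 1 := by push_cast; omega
      rw [hb]
      have hlob : lo ≤ lo + (m:Int) := by omega
      have hlob1 : lo + 1 ≤ lo + (m:Int) := by omega
      have hsplit : PySem.List.pyRange lo ((lo + (m:Int)) + 1) 1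
          = PySem.List.pyRange lo (lo + (m:Int)) 1 ++ [lo + (m:Int)] :=
        PySem.List.pyRange_one_succ_right hlob
      have hsplitB : PySem.List.pyRange (lo + 1) ((lo + (m:Int)) + 1) 1
          = PySem.List.pyRange (lo + 1) (lo + (m:Int)) 1 ++ [lo + (m:Int)] :=
        PySem.List.pyRange_one_succ_right hlob1
      unfold max2bf max2bf_alt at ih ⊢
      rw [hsplit, hsplitB, List.foldl_append, List.foldl_append]
      simp only [List.foldl_cons, List.foldl_nil]
      set b : Int := lo + (m:Int) with hbdef
      set x1 : Int := (PySem.List.pyRange lo b 1).foldl (pvStep A) lo with hx1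
      set p : Int × Int :=
        (PySem.List.pyRange (lo + 1) b 1).foldl (pvUpd A)
          (PySem.List.pyGetD A lo 0, PySem.List.pyGetD A lo 0) with hp
      have hx1mem : lo ≤ x1 ∧ x1 < b := by
        rcases pvStep_foldl_mem A (PySem.List.pyRange lo b 1) lo with h | h
        · constructor <;> omega
        · rw [PySem.List.mem_pyRange_one] at h; exact h
      have hfst : PySem.List.pyGetD A x1 0 = p.1 := by
        have := congrArg Prod.fst ih; simpa using this
      by_cases hc : PySem.List.pyGetD A x1 0 < PySem.List.pyGetD A b 0
      · -- new max at b: A's first x2 pass over [lo, b) re-computes x1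
        have hstep : pvStep A x1 b = b := by unfold pvStep; rw [if_pos hc]
        rw [hstep]
        rw [PySem.List.pyRange_one_eq_nil (le_refl (b + 1))]
        simp only [List.foldl_nil, ← hx1]
        rw [pvUpd_eq, if_pos (hfst ▸ hc), ← hfst]
      · -- x1 unchanged: A's third loop gains the element b, matching B's elif branch
        have hstep : pvStep A x1 b = x1 := by unfold pvStep; rw [if_neg hc]
        rw [hstep]
        have h3 : PySem.List.pyRange (x1 + 1) (b + 1) 1
            = PySem.List.pyRange (x1 + 1) b 1 ++ [b] :=
          PySem.List.pyRange_one_succ_right (by omega)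
        rw [h3, List.foldl_append]
        simp only [List.foldl_cons, List.foldl_nil]
        have hsnd : PySem.List.pyGetD A
            ((PySem.List.pyRange (x1 + 1) b 1).foldl (pvStep A)
              ((PySem.List.pyRange lo x1 1).foldl (pvStep A) lo)) 0 = p.2 := by
          have := congrArg Prod.snd ih; simpa using this
        have hcp : ¬ p.1 < PySem.List.pyGetD A b 0 := by rw [← hfst]; exact hc
        rw [pvStep_getD, hsnd, hfst, pvUpd_eq, if_neg hcp]
        by_cases hd : p.2 < PySem.List.pyGetD A b 0 <;> simp [hd]

-- ===== VERDICT (by name: the statement is the Claim_ definition above) =====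
theorem max2bf_spec : Claim_equal_max2bf := by
  intro A lo hi _ _
  unfold Spec_max2bf
  by_cases h : hi ≤ lo
  · simp [max2bf, max2bf_alt, PySem.List.pyRange_one_eq_nil, h,
      PySem.List.pyRange_one_eq_nil (by omega : hi ≤ lo + 1)]
  · have hhi : hi = lo + ((hi - lo).toNat : Int) := by omega
    rw [hhi]
    exact pv_main A lo (hi - lo).toNat
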